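-- pv_equiv track=rewrite | github.com/vladanaSTM/nl2atl | src/cli/run_llm_judge.py | compute_stats_from_rows
-- ===== SOURCE A (Python) =====
-- def compute_stats_from_rows(rows: list) -> dict:
--     stats = {
--         "unmatched": 0,
--         "auto_exact": 0,
--         "llm_calls": 0,
--         "no_llm": 0,
--     }
--
--     for row in rows:
--         decision_method = row.get("decision_method")
--         if decision_method == "unmatched":
--             stats["unmatched"] += 1
--         elif decision_method == "exact":
--             stats["auto_exact"] += 1
--         elif decision_method == "llm":
--             stats["llm_calls"] += 1
--         elif decision_method == "no_llm":
--             stats["no_llm"] += 1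
--
--     return stats
-- ===== SOURCE B (Python) =====
-- def compute_stats_from_rows(rows: list) -> dict:
--     # Four independent counting passes, one per output category, instead of a
--     # single loop with a four-way accumulator.
--     def tally(method):
--         return sum(1 for row in rows if row.get("decision_method") == method)
--
--     return {
--         "unmatched": tally("unmatched"),
--         "auto_exact": tally("exact"),
--         "llm_calls": tally("llm"),
--         "no_llm": tally("no_llm"),
--     }
-- ===== Notes on version B (the rewrite author's own statement) =====
-- stated objective: alternative
-- what changed: Replaces A's single loop with a four-way if/elif accumulator by four independent staged counting passes, one per output category, each summing matches of one decision_method value.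
import Mathlib
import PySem

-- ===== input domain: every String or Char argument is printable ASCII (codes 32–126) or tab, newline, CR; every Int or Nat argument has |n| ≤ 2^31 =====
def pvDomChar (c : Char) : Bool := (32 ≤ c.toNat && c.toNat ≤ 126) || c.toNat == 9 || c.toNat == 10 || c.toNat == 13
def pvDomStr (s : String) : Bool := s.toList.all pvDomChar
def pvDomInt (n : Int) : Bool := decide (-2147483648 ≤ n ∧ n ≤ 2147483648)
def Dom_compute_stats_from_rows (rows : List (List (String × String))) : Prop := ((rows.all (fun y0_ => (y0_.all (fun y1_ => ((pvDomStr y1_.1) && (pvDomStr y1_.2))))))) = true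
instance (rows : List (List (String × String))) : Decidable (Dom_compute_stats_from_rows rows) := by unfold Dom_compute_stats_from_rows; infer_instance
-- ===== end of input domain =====

-- B replaces A's single four-way accumulator loop by four independent counting
-- passes, one per output category (alternative decomposition; same cost).

-- ===== PORT A =====
def compute_stats_from_rows (rows : List (List (String × String))) : List (String × Int) :=
  let stats0 : PySem.Dict String Int :=
    PySem.Dict.mk [("unmatched", 0), ("auto_exact", 0), ("llm_calls", 0), ("no_llm", 0)]
  (rows.foldl (fun stats row =>
    let decision_method := (PySem.Dict.mk row).get? "decision_method"
    if decision_method = some "unmatched" then stats.modify "unmatched" 0 (· + 1)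
    else if decision_method = some "exact" then stats.modify "auto_exact" 0 (· + 1)
    else if decision_method = some "llm" then stats.modify "llm_calls" 0 (· + 1)
    else if decision_method = some "no_llm" then stats.modify "no_llm" 0 (· + 1)
    else stats) stats0).items

-- ===== PORT B =====
-- tally(method) = sum(1 for row in rows if row.get("decision_method") == method)
def tally_alt (rows : List (List (String × String))) (method : String) : Int :=
  (rows.countP (fun row => (PySem.Dict.mk row).get? "decision_method" == some method) : Int)

def compute_stats_from_rows_alt (rows : List (List (String × String))) : List (String × Int) :=
  [("unmatched", tally_alt rows "unmatched"),
   ("auto_exact", tally_alt rows "exact"),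
   ("llm_calls", tally_alt rows "llm"),
   ("no_llm", tally_alt rows "no_llm")]

-- ===== PRECONDITION & SPEC =====
def Spec_compute_stats_from_rows (rows : List (List (String × String))) (out : List (String × Int)) : Prop := out = compute_stats_from_rows_alt rows
instance (rows : List (List (String × String))) (out : List (String × Int)) : Decidable (Spec_compute_stats_from_rows rows out) := by unfold Spec_compute_stats_from_rows; infer_instance

-- ===== CLAIM (what is proved, stated in full; the proofs are below) =====
def Claim_equal_compute_stats_from_rows : Prop := ∀ (rows : List (List (String × String))), Dom_compute_stats_from_rows rows → Spec_compute_stats_from_rows rows (compute_stats_from_rows rows)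

-- ===== LEMMAS AND PROOFS =====

-- modify on the fixed four-key stats dict, one lemma per branch of A
theorem mod_unm (u e l n : Int) :
    (PySem.Dict.mk [("unmatched", u), ("auto_exact", e), ("llm_calls", l), ("no_llm", n)]).modify "unmatched" 0 (· + 1) =
    PySem.Dict.mk [("unmatched", u + 1), ("auto_exact", e), ("llm_calls", l), ("no_llm", n)] := by
  simp [PySem.Dict.modify, PySem.Dict.getD, PySem.Dict.get?, PySem.Dict.insert]

theorem mod_exa (u e l n : Int) :
    (PySem.Dict.mk [("unmatched", u), ("auto_exact", e), ("llm_calls", l), ("no_llm", n)]).modify "auto_exact" 0 (· + 1) =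
    PySem.Dict.mk [("unmatched", u), ("auto_exact", e + 1), ("llm_calls", l), ("no_llm", n)] := by
  simp [PySem.Dict.modify, PySem.Dict.getD, PySem.Dict.get?, PySem.Dict.insert]

theorem mod_llm (u e l n : Int) :
    (PySem.Dict.mk [("unmatched", u), ("auto_exact", e), ("llm_calls", l), ("no_llm", n)]).modify "llm_calls" 0 (· + 1) =
    PySem.Dict.mk [("unmatched", u), ("auto_exact", e), ("llm_calls", l + 1), ("no_llm", n)] := by
  simp [PySem.Dict.modify, PySem.Dict.getD, PySem.Dict.get?, PySem.Dict.insert]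

theorem mod_nol (u e l n : Int) :
    (PySem.Dict.mk [("unmatched", u), ("auto_exact", e), ("llm_calls", l), ("no_llm", n)]).modify "no_llm" 0 (· + 1) =
    PySem.Dict.mk [("unmatched", u), ("auto_exact", e), ("llm_calls", l), ("no_llm", n + 1)] := by
  simp [PySem.Dict.modify, PySem.Dict.getD, PySem.Dict.get?, PySem.Dict.insert]

-- A's loop, started from any four counts, adds one per-category match count.
theorem computeA_loop (rows : List (List (String × String))) (u e l n : Int) :
    (rows.foldl (fun stats row =>
      let decision_method := (PySem.Dict.mk row).get? "decision_method"
      if decision_method = some "unmatched" then stats.modify "unmatched" 0 (· + 1)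
      else if decision_method = some "exact" then stats.modify "auto_exact" 0 (· + 1)
      else if decision_method = some "llm" then stats.modify "llm_calls" 0 (· + 1)
      else if decision_method = some "no_llm" then stats.modify "no_llm" 0 (· + 1)
      else stats)
      (PySem.Dict.mk [("unmatched", u), ("auto_exact", e), ("llm_calls", l), ("no_llm", n)])) =
    PySem.Dict.mk [
      ("unmatched", u + tally_alt rows "unmatched"),
      ("auto_exact", e + tally_alt rows "exact"),
      ("llm_calls", l + tally_alt rows "llm"),
      ("no_llm", n + tally_alt rows "no_llm")] := by
  induction rows generalizing u e l n with
  | nil => simp [tally_alt]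
  | cons row rest ih =>
    rw [List.foldl_cons]
    have hc : ∀ m : String, tally_alt (row :: rest) m =
        (if (PySem.Dict.mk row).get? "decision_method" = some m then 1 else 0) + tally_alt rest m := by
      intro m
      simp only [tally_alt, List.countP_cons]
      split_ifs with h <;> simp_all <;> push_cast <;> ring
    show (rest.foldl _
      (if (PySem.Dict.mk row).get? "decision_method" = some "unmatched" then _
       else if (PySem.Dict.mk row).get? "decision_method" = some "exact" then _
       else if (PySem.Dict.mk row).get? "decision_method" = some "llm" then _
       else if (PySem.Dict.mk row).get? "decision_method" = some "no_llm" then _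
       else _)) = _
    rw [hc "unmatched", hc "exact", hc "llm", hc "no_llm"]
    generalize hm : (PySem.Dict.mk row).get? "decision_method" = m at *
    by_cases h1 : m = some "unmatched"
    · rw [if_pos h1, mod_unm, ih]; simp [h1]; omega
    · rw [if_neg h1]
      by_cases h2 : m = some "exact"
      · rw [if_pos h2, mod_exa, ih]; simp [h1, h2]; omega
      · rw [if_neg h2]
        by_cases h3 : m = some "llm"
        · rw [if_pos h3, mod_llm, ih]; simp [h1, h2, h3]; omega
        · rw [if_neg h3]
          by_cases h4 : m = some "no_llm"
          · rw [if_pos h4, mod_nol, ih]; simp [h1, h2, h3, h4]; omega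
          · rw [if_neg h4, ih]; simp [h1, h2, h3, h4]

-- ===== VERDICT (by name: the statement is the Claim_ definition above) =====
theorem compute_stats_from_rows_spec : Claim_equal_compute_stats_from_rows := by
  intro rows _
  show _ = _
  simp [compute_stats_from_rows, compute_stats_from_rows_alt, computeA_loop, PySem.Dict.items]
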